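/- GENERATED by farm/worked/mk_tree_copies.py from farm/worked/start_page/Proof.lean (a worked proof of the farm's unit `start_page`,
   accepted by the verdict) — do not edit. -/
/-
  `start_page` (CONTRACTS 47; stb_vorbis_fixed.c:1525): `if (!capture_pattern(f)) return error(f, 30); return start_page_no_capturepattern(f);`

      10cbc0 push rbx ; mov rbx, rdi ; 10cbc4 call capture_pattern ; 10cbc9 test eax, eax ; je 10cbd7
      10cbcd mov rdi, rbx ; 10cbd0 call start_page_no_capturepattern ; 10cbd5 pop rbx ; ret
      10cbd7 mov esi, 30 ; mov rdi, rbx ; 10cbdf call error ; 10cbe4 jmp 10cbd5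

  After every call the walker's `w_rdi_<addr>` / `w_rsp_<addr>` give the callee-entry state's rdi and rsp.
-/
import Asan.CheckWalk
import Vorbis.Spec.ReaderLemmas
import Vorbis.Spec.Units.start_page

open X86 X86.User Asan Vorbis

set_option maxRecDepth 4000
set_option maxHeartbeats 4000000


/-- `start_page(f)` satisfies its contract: `capture_pattern`, then `start_page_no_capturepattern` (μ: 4 real bytes consumed
before the page header's bound of D-11 ⇒ strictly smaller) or `error(f, 30)` (nothing that `Bits` or μ read is written). -/
theorem Vorbis.Spec.Worked.start_page_ok : Vorbis.Spec.start_page.Statement := by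
  intro Lay hLay μ hμ u₀ hcode h_cap h_spnc h_err others frames Blk len u ret he hpre
  v_entry he
  obtain ⟨hpre, hbound⟩ := hpre
  have hcap := h_cap others frames Blk len
  have hspnc := h_spnc others frames Blk len
  have herr := h_err others frames
  have hsp := hpre.shadow.rsp
  have hwhere := hpre.where_obj
  -- 10cbc0 push rbx ; mov rbx, rdi ; 10cbc4 call capture_pattern
  u_walk hcode [hμ.vendor] span [Vorbis.L.textLo, Vorbis.L.textHi] side (v_side)
  case call_inv =>
    v_inv
  case pre_10cbc4 =>
    -- the callee's precondition: the shadow clause from the function's own, `Bits` over the two pushes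
    have hsame0 : Mem.SameExcept [⟨(u.reg .rsp).toNat - 16, (u.reg .rsp).toNat⟩] u.mem s_10cbc4.mem := by
      u_same
    have hk0 := Vorbis.Spec.Paging.reader_of_footprint hpre.bits hsame0 (by
      intro w hw
      have e : w = ⟨(u.reg .rsp).toNat - 16, (u.reg .rsp).toNat⟩ := List.mem_singleton.mp hw
      subst e
      simp only []
      omega)
    have hun' : ShadowUntouched u.mem s_10cbc4.mem := by v_untouched
    have hsh' : ShadowPre others frames s_10cbc4 :=
      hpre.shadow.call hun' (by u_omega) (by u_omega) (by u_omega)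
    have hrdi : s_10cbc4.reg .rdi = u.reg .rdi := w_kept.get .rdi rfl
    exact hpre.again hsh' hrdi hk0.1.bits
  -- the state at capture_pattern's entry: `Bits`, μ and `next_seg` over the two pushes
  have hsame0 : Mem.SameExcept [⟨(u.reg .rsp).toNat - 16, (u.reg .rsp).toNat⟩] u.mem s_10cbc4.mem := by
    rw [w_mem_10cbc4]
    u_same
  have hk0 := Vorbis.Spec.Paging.reader_of_footprint hpre.bits hsame0 (by
    intro w hw
    have e : w = ⟨(u.reg .rsp).toNat - 16, (u.reg .rsp).toNat⟩ := List.mem_singleton.mp hw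
    subst e
    simp only []
    omega)
  -- 10cbc9, after capture_pattern
  have hp := w_post
  have c_rdi : s_10cbc4.reg .rdi = u.reg .rdi := w_kept_10cbc4.get .rdi rfl
  have c_rsp := w_rsp_10cbc4
  have w_eq := Vorbis.conv_code_eqOn w_code
  simp only [X86.User.Spec.footprint, vspec, c_rsp, c_rdi] at w_same
  have hpostC : Vorbis.Spec.CapturePost Blk len (u.reg .rdi).toNat s_10cbc4 s_10cbc4r := by
    rw [← c_rdi]
    exact hp
  -- `next_seg` is not in capture_pattern's footprint
  have hkA := Vorbis.Spec.Reader.kept_of_callee (f := (u.reg .rdi).toNat) (by omega) w_same (by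
    simp only [List.mem_cons, List.mem_nil_iff, or_false, forall_eq_or_imp, forall_eq]
    repeat' apply And.intro
    all_goals u_omega)
  -- the stack slots and the function's footprint at the returned state
  have hp1 : UInt64.ofNat (s_10cbc4.mem.readLE (u.reg .rsp - 8) 8) = u.reg .rbx := by
    u_resolve
  have hp0 : UInt64.ofNat (s_10cbc4.mem.readLE (u.reg .rsp) 8) = ret := by
    u_resolve
  have hs1 : UInt64.ofNat (s_10cbc4r.mem.readLE (u.reg .rsp - 8) 8) = u.reg .rbx := by u_frame hp1
  have hs0 : UInt64.ofNat (s_10cbc4r.mem.readLE (u.reg .rsp) 8) = ret := by u_frame hp0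
  have hsameA : Mem.SameExcept
      [⟨(u.reg .rsp).toNat - 192, (u.reg .rsp).toNat⟩,
       ⟨(u.reg .rdi).toNat + 48, (u.reg .rdi).toNat + 56⟩, ⟨(u.reg .rdi).toNat + 84, (u.reg .rdi).toNat + 96⟩,
       ⟨(u.reg .rdi).toNat + 136, (u.reg .rdi).toNat + 144⟩, ⟨(u.reg .rdi).toNat + 1484, (u.reg .rdi).toNat + 1748⟩,
       ⟨(u.reg .rdi).toNat + 1752, (u.reg .rdi).toNat + 1756⟩, ⟨(u.reg .rdi).toNat + 1776, (u.reg .rdi).toNat + 1784⟩]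
      u.mem s_10cbc4r.mem := by
    refine Vorbis.Spec.Reader.sameExcept_through_callee ?_ w_same ?_
    · rw [w_mem_10cbc4]
      u_same
    · simp only [List.forall_mem_cons, List.not_mem_nil, false_imp_iff, implies_true, and_true, X86.User.inSpans_cons,
        X86.User.inSpans_nil, or_false]
      repeat' apply And.intro
      all_goals u_omega
  have hunA : ShadowUntouched u.mem s_10cbc4r.mem := by
    rw [w_mem_10cbc4] at w_same
    v_untouched
  have hdfA : s_10cbc4r.flags .df = false := (show X86.User.abiInv _ from w_inv).1
  have hmxA : s_10cbc4r.mxcsr &&& 8064 = 8064 := (show X86.User.abiInv _ from w_inv).2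
  -- `Bits`, μ, `next_seg` at the returned state, against the function's entry
  have hrpA : ReaderPost Blk len u.mem s_10cbc4r.mem (u.reg .rdi).toNat := hk0.1.trans hpostC.reader
  have hnsA : stb_vorbis.next_seg s_10cbc4r.mem (u.reg .rdi).toNat = stb_vorbis.next_seg u.mem (u.reg .rdi).toNat := by
    rw [hkA.1, hk0.2]
  -- the push of a return address (both calls that follow) keeps them
  have hpush : ∀ k : Nat, ReaderPost Blk len s_10cbc4r.mem (s_10cbc4r.mem.writeLE (u.reg .rsp - 16) 8 k) (u.reg .rdi).toNat ∧
      stb_vorbis.next_seg (s_10cbc4r.mem.writeLE (u.reg .rsp - 16) 8 k) (u.reg .rdi).toNat =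
        stb_vorbis.next_seg s_10cbc4r.mem (u.reg .rdi).toNat := by
    intro k
    have hw : Mem.SameExcept [⟨(u.reg .rsp).toNat - 16, (u.reg .rsp).toNat - 8⟩] s_10cbc4r.mem
        (s_10cbc4r.mem.writeLE (u.reg .rsp - 16) 8 k) := by
      refine Mem.SameExcept.writeLE _ _ _ 8 k (by u_omega) ⟨_, List.mem_singleton.mpr rfl, ?_, ?_⟩
      · show (u.reg .rsp).toNat - 16 ≤ (u.reg .rsp - 16).toNat
        u_omega
      · show (u.reg .rsp - 16).toNat + 8 ≤ (u.reg .rsp).toNat - 8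
        u_omega
    refine Vorbis.Spec.Paging.reader_of_footprint hrpA.bits hw ?_
    intro w hw'
    have e : w = ⟨(u.reg .rsp).toNat - 16, (u.reg .rsp).toNat - 8⟩ := List.mem_singleton.mp hw'
    subst e
    simp only []
    omega
  clear hp1 hp0
  obtain ⟨z, w_rax⟩ : ∃ z, s_10cbc4r.reg .rax = z := ⟨_, rfl⟩
  have hraxA : s_10cbc4r.reg .rax = z := w_rax
  -- 10cbc9 test eax, eax ; je: both arms, each up to the state its callee returned
  u_walk hcode [hμ.vendor] span [Vorbis.L.textLo, Vorbis.L.textHi] side (v_side)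
  case call_inv =>
    refine Vorbis.abiInv_of ?_ ?_
    · rw [w_flags]
      simp only [X86.User.df_setStatus]
      exact hdfA
    · rw [w_mxcsr]
      exact hmxA
  case pre_10cbdf =>
    -- `error(f, 30)`: the shadow clause and the `obj` clause
    have hun' : ShadowUntouched u.mem s_10cbdf.mem := by v_untouched
    have hsh' : ShadowPre others frames s_10cbdf :=
      hpre.shadow.call hun' (by u_omega) (by u_omega) (by u_omega)
    refine ⟨hsh', ?_⟩
    rw [w_rdi]
    exact hpre.env.obj
  case call_inv =>
    refine Vorbis.abiInv_of ?_ ?_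
    · rw [w_flags]
      simp only [X86.User.df_setStatus]
      exact hdfA
    · rw [w_mxcsr]
      exact hmxA
  case pre_10cbd0 =>
    -- `start_page_no_capturepattern(f)`: `Bits` over the push, `next_seg` still −1 or 0
    have hun' : ShadowUntouched u.mem s_10cbd0.mem := by v_untouched
    have hsh' : ShadowPre others frames s_10cbd0 :=
      hpre.shadow.call hun' (by u_omega) (by u_omega) (by u_omega)
    obtain ⟨hrpb, hnsb⟩ := hpush 1100757
    rw [← w_mem] at hrpb hnsb
    refine ⟨hpre.again hsh' w_rdi hrpb.bits, ?_⟩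
    unfold Vorbis.Spec.AtPageBoundary at hbound ⊢
    rw [w_rdi, hnsb, hnsA]
    exact hbound
  · -- 10cbe4, after `error(f, 30)`: jmp 10cbd5 ; pop rbx ; ret — capture_pattern returned 0
    have hp := w_post
    have c_rdi := w_rdi_10cbdf
    have c_rsp := w_rsp_10cbdf
    obtain ⟨hrax, hunE, hstored⟩ := hp
    have w_eq := Vorbis.conv_code_eqOn w_code
    simp only [X86.User.Spec.footprint, vspec, c_rsp, c_rdi] at w_same
    obtain ⟨hrpc, hnsc⟩ := hpush 1100772
    rw [← w_mem_10cbdf] at hrpc hnsc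
    -- `error` writes `[f + 140, f + 144)` only
    have hkC := Vorbis.Spec.Paging.reader_of_footprint hrpc.bits w_same (by
      simp only [List.mem_cons, List.mem_nil_iff, or_false, forall_eq_or_imp, forall_eq]
      repeat' apply And.intro
      all_goals u_omega)
    rw [w_mem_10cbdf] at w_same
    have hs1r : UInt64.ofNat (s_10cbdfr.mem.readLE (u.reg .rsp - 8) 8) = u.reg .rbx := by u_frame hs1
    have hs0r : UInt64.ofNat (s_10cbdfr.mem.readLE (u.reg .rsp) 8) = ret := by u_frame hs0
    have hunC : ShadowUntouched u.mem s_10cbdfr.mem := by v_untouched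
    have hsameC : Mem.SameExcept
        [⟨(u.reg .rsp).toNat - 192, (u.reg .rsp).toNat⟩,
         ⟨(u.reg .rdi).toNat + 48, (u.reg .rdi).toNat + 56⟩, ⟨(u.reg .rdi).toNat + 84, (u.reg .rdi).toNat + 96⟩,
         ⟨(u.reg .rdi).toNat + 136, (u.reg .rdi).toNat + 144⟩, ⟨(u.reg .rdi).toNat + 1484, (u.reg .rdi).toNat + 1748⟩,
         ⟨(u.reg .rdi).toNat + 1752, (u.reg .rdi).toNat + 1756⟩, ⟨(u.reg .rdi).toNat + 1776, (u.reg .rdi).toNat + 1784⟩]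
        u.mem s_10cbdfr.mem := by
      refine Vorbis.Spec.Reader.sameExcept_through_callee ?_ w_same ?_
      · u_same
      · simp only [List.forall_mem_cons, List.not_mem_nil, false_imp_iff, implies_true, and_true, X86.User.inSpans_cons,
          X86.User.inSpans_nil, or_false]
        repeat' apply And.intro
        all_goals u_omega
    have hdfC : s_10cbdfr.flags .df = false := (show X86.User.abiInv _ from w_inv).1
    have hmxC : s_10cbdfr.mxcsr &&& 8064 = 8064 := (show X86.User.abiInv _ from w_inv).2
    have hrpC : ReaderPost Blk len u.mem s_10cbdfr.mem (u.reg .rdi).toNat := (hrpA.trans hrpc).trans hkC.1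
    have hnsC : stb_vorbis.next_seg s_10cbdfr.mem (u.reg .rdi).toNat = stb_vorbis.next_seg u.mem (u.reg .rdi).toNat := by
      rw [hkC.2, hnsc, hnsA]
    clear w_same hs1 hs0 hkC hrpc hnsc hsameA hpush
    u_walk hcode [hμ.vendor] span [Vorbis.L.textLo, Vorbis.L.textHi] side (v_side)
    -- 10cbd6, the state after the `ret`
    refine ReachVia.done ?_
    clear hs1r hs0r he_retAddr
    v_returned
    show Vorbis.Spec.StartPagePost Blk len (u.reg .rdi).toNat u s_10cbd6
    rw [← w_mem] at hunC hrpC hnsC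
    refine ⟨hunC, hrpC, Or.inl w_rax, ?_, fun _ => hnsC⟩
    intro h1
    rw [w_rax] at h1
    exact absurd h1 (by decide)
  · -- 10cbd5, after `start_page_no_capturepattern(f)`: pop rbx ; ret — capture_pattern returned 1
    have hp := w_post
    have c_rdi := w_rdi_10cbd0
    have c_rsp := w_rsp_10cbd0
    have w_eq := Vorbis.conv_code_eqOn w_code
    simp only [X86.User.Spec.footprint, vspec, c_rsp, c_rdi] at w_same
    have hpostP : Vorbis.Spec.PageNoCapturePost Blk len (u.reg .rdi).toNat s_10cbd0 s_10cbd0r := by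
      rw [← c_rdi]
      exact hp
    obtain ⟨hrpb, hnsb⟩ := hpush 1100757
    rw [← w_mem_10cbd0] at hrpb hnsb
    -- capture_pattern returned 1: four real bytes were consumed
    have hz1 : z = 1 := by
      rcases hpostC.result with h | h
      · exfalso
        apply hbr_10cbcb
        rw [← hraxA, h]
        rfl
      · rw [← hraxA]
        exact h
    have hm := (hpostC.matched (by rw [hraxA, hz1])).2
    have hmu0 := hk0.1.mu_le
    have hmub := hrpb.mu_le
    have hbd := hpostP.bound
    -- THE μ COMPOSITION (D-11): μ is strictly smaller, success or failure
    have hlt : mu s_10cbd0r.mem (u.reg .rdi).toNat < mu u.mem (u.reg .rdi).toNat := by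
      omega
    rw [w_mem_10cbd0] at w_same
    have hs1r : UInt64.ofNat (s_10cbd0r.mem.readLE (u.reg .rsp - 8) 8) = u.reg .rbx := by u_frame hs1
    have hs0r : UInt64.ofNat (s_10cbd0r.mem.readLE (u.reg .rsp) 8) = ret := by u_frame hs0
    have hunB : ShadowUntouched u.mem s_10cbd0r.mem := by v_untouched
    have hsameB : Mem.SameExcept
        [⟨(u.reg .rsp).toNat - 192, (u.reg .rsp).toNat⟩,
         ⟨(u.reg .rdi).toNat + 48, (u.reg .rdi).toNat + 56⟩, ⟨(u.reg .rdi).toNat + 84, (u.reg .rdi).toNat + 96⟩,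
         ⟨(u.reg .rdi).toNat + 136, (u.reg .rdi).toNat + 144⟩, ⟨(u.reg .rdi).toNat + 1484, (u.reg .rdi).toNat + 1748⟩,
         ⟨(u.reg .rdi).toNat + 1752, (u.reg .rdi).toNat + 1756⟩, ⟨(u.reg .rdi).toNat + 1776, (u.reg .rdi).toNat + 1784⟩]
        u.mem s_10cbd0r.mem := by
      refine Vorbis.Spec.Reader.sameExcept_through_callee ?_ w_same ?_
      · u_same
      · simp only [List.forall_mem_cons, List.not_mem_nil, false_imp_iff, implies_true, and_true, X86.User.inSpans_cons,
          X86.User.inSpans_nil, or_false]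
        repeat' apply And.intro
        all_goals u_omega
    have hdfB : s_10cbd0r.flags .df = false := (show X86.User.abiInv _ from w_inv).1
    have hmxB : s_10cbd0r.mxcsr &&& 8064 = 8064 := (show X86.User.abiInv _ from w_inv).2
    have hnsB : s_10cbd0r.reg .rax = 0 →
        stb_vorbis.next_seg s_10cbd0r.mem (u.reg .rdi).toNat = stb_vorbis.next_seg u.mem (u.reg .rdi).toNat := by
      intro h0
      rw [hpostP.failed h0, hnsb, hnsA]
    obtain ⟨z2, w_rax⟩ : ∃ z2, s_10cbd0r.reg .rax = z2 := ⟨_, rfl⟩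
    have hraxB : s_10cbd0r.reg .rax = z2 := w_rax
    clear w_same hs1 hs0 hsameA hpush hm hmu0 hmub hbd
    u_walk hcode [hμ.vendor] span [Vorbis.L.textLo, Vorbis.L.textHi] side (v_side)
    -- 10cbd6, the state after the `ret`
    refine ReachVia.done ?_
    clear hs1r hs0r he_retAddr
    -- (`v_returned` a second time would clash with the first one's named holes: the fields by hand)
    refine X86.User.Returned.mk w_rip w_rsp ?_ ?_ (Vorbis.conv_code_in w_eq) ?_ ?_
    · u_saved
    · simp only [X86.User.Spec.footprint, vspec]
      u_same
    · v_inv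
    show Vorbis.Spec.StartPagePost Blk len (u.reg .rdi).toNat u s_10cbd6
    rw [← hraxB] at w_rax
    rw [← w_mem] at hunB hlt hnsB
    have hbB := hpostP.bits
    have hst := hpostP.started
    rw [← w_mem] at hbB hst
    refine ⟨hunB, ⟨hbB, Nat.le_of_lt hlt⟩, ?_, ?_, ?_⟩
    · rw [w_rax]
      exact hpostP.result
    · intro h1
      rw [w_rax] at h1
      exact ⟨(hst h1).1, hlt⟩
    · intro h0
      rw [w_rax] at h0
      exact hnsB h0


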